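-- pv_equiv track=rewrite | github.com/tsvikas/advent-of-code-2023 | aoc2023/d13a.py | find_mirror_row
-- ===== SOURCE A (Python) =====
-- import collections
--
-- def find_mirror_row(mirrors: list[str]) -> list[int]:
--     """
--     >>> find_mirror_row(["#.#", ".#.", ".#.", "#.#", "...", "..#"])
--     [2]
--     >>> find_mirror_row(["...", "..#", "#.#", ".#.", ".#.", ".#.", ".#.", "#.#"])
--     [5]
--     """
--     pattern_lines = collections.defaultdict(list)
--     for i, line in enumerate(mirrors):
--         pattern_lines[line].append(i)
--     # reflection from top
--     total_rows_above_reflections: list[int] = []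
--     for possible_row in pattern_lines[mirrors[0]]:
--         if possible_row == 0:
--             continue
--         size_of_reflection, mod = divmod(possible_row + 1, 2)
--         if mod != 0:
--             continue
--         if all(
--             possible_row - i in pattern_lines[mirrors[i]]
--             for i in range(size_of_reflection)
--         ):
--             total_rows_above_reflections.append(size_of_reflection)
--     # reflection from bottom
--     for possible_row in pattern_lines[mirrors[-1]]:
--         if possible_row == len(mirrors) - 1:
--             continue
--         size_of_reflection, mod = divmod(len(mirrors) - possible_row, 2)
--         if mod != 0:
--             continue
--         if all(
--             possible_row + i in pattern_lines[mirrors[len(mirrors) - 1 - i]]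
--             for i in range(size_of_reflection)
--         ):
--             total_rows_above_reflections.append(len(mirrors) - size_of_reflection)
--     return total_rows_above_reflections
-- ===== SOURCE B (Python) =====
-- def find_mirror_row(mirrors: list[str]) -> list[int]:
--     """Two direct palindrome scans over prefix/suffix blocks; no dict of line indices."""
--     n = len(mirrors)
--     result = []
--     # reflections touching the top edge: prefix mirrors[0:2s] is a palindrome
--     for size in range(1, n // 2 + 1):
--         if all(mirrors[j] == mirrors[2 * size - 1 - j] for j in range(size)):
--             result.append(size)
--     # reflections touching the bottom edge: suffix mirrors[n-2s:n] is a palindrome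
--     for size in range(n // 2, 0, -1):
--         if all(mirrors[n - 2 * size + j] == mirrors[n - 1 - j] for j in range(size)):
--             result.append(n - size)
--     return result
-- ===== Notes on version B (the rewrite author's own statement) =====
-- stated objective: simpler
-- what changed: B drops A's line-to-indices defaultdict and its candidate-row scans entirely and instead runs two direct palindrome scans, one over prefix blocks mirrors[0:2s] for s = 1..n//2 and one over suffix blocks mirrors[n-2s:n] for s = n//2..1.
import Mathlib
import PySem

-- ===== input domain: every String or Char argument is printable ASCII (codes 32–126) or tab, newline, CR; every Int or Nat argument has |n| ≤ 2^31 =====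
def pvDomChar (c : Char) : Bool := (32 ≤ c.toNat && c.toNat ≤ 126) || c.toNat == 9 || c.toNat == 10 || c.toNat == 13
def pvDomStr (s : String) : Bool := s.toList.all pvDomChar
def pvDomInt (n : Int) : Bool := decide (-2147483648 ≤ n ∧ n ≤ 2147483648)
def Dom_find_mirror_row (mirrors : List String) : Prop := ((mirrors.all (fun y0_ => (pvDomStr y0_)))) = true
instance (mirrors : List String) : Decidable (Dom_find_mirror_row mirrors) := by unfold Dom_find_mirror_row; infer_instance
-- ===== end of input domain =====

-- B replaces A's line→indices dictionary by two direct palindrome scans; objective: simpler.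

-- ===== PORT A =====
-- literal port of A: group row indices by line in an insertion-ordered dict, then scan the
-- candidate rows equal to mirrors[0] (resp. mirrors[-1]); mirrors[0]/mirrors[-1] raise
-- IndexError on [] (excluded by Pre_), so the total pyGetD form is exact under Pre_;
-- all inner indices are in range whenever the loop reaches them, so pyGetD is exact there too.
def find_mirror_row (mirrors : List String) : List Int :=
  let pl : PySem.Dict String (List Int) :=
    (PySem.List.enumerate mirrors).foldl (fun d p => d.modify p.2 [] (fun x => x ++ [p.1])) PySem.Dict.empty
  let first := PySem.List.pyGetD mirrors 0 ""
  let lastRow := PySem.List.pyGetD mirrors (-1) ""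
  let n : Int := PySem.List.len mirrors
  let top := (pl.getD first []).foldl (fun acc p =>
      if p == 0 then acc
      else if PySem.Int.mod (p + 1) 2 != 0 then acc
      else if (PySem.List.pyRange 0 (PySem.Int.floordiv (p + 1) 2) 1).all (fun i =>
          (pl.getD (PySem.List.pyGetD mirrors i "") []).contains (p - i))
      then acc ++ [PySem.Int.floordiv (p + 1) 2] else acc) []
  (pl.getD lastRow []).foldl (fun acc p =>
      if p == n - 1 then acc
      else if PySem.Int.mod (n - p) 2 != 0 then acc
      else if (PySem.List.pyRange 0 (PySem.Int.floordiv (n - p) 2) 1).all (fun i =>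
          (pl.getD (PySem.List.pyGetD mirrors (n - 1 - i) "") []).contains (p + i))
      then acc ++ [n - PySem.Int.floordiv (n - p) 2] else acc) top

-- ===== PORT B =====
-- literal port of B: top-edge palindrome scan (size 1..n//2), then bottom-edge scan (n//2..1)
def find_mirror_row_alt (mirrors : List String) : List Int :=
  let n := mirrors.length
  let top := ((List.range' 1 (n / 2)).filter (fun s =>
      (List.range s).all (fun j => mirrors.getD j "" == mirrors.getD (2*s-1-j) ""))).map
      (fun s : Nat => (s : Int))
  let bot := ((List.range' 1 (n / 2)).reverse.filter (fun s =>
      (List.range s).all (fun j => mirrors.getD (n-2*s+j) "" == mirrors.getD (n-1-j) ""))).map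
      (fun s : Nat => (n : Int) - (s : Int))
  top ++ bot

-- ===== PRECONDITION & SPEC =====
-- Pre_ excludes only the empty list, on which A raises IndexError at mirrors[0].
def Pre_find_mirror_row (mirrors : List String) : Prop := mirrors ≠ []
instance (mirrors : List String) : Decidable (Pre_find_mirror_row mirrors) := by unfold Pre_find_mirror_row; infer_instance
def pvWitness_find_mirror_row : List String := ["#.#", ".#.", ".#.", "#.#", "...", "..#"]

def Spec_find_mirror_row (mirrors : List String) (out : List Int) : Prop := out = find_mirror_row_alt mirrors
instance (mirrors : List String) (out : List Int) : Decidable (Spec_find_mirror_row mirrors out) := by unfold Spec_find_mirror_row; infer_instance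

-- ===== CLAIM (what is proved, stated in full; the proofs are below) =====
def Claim_equal_find_mirror_row : Prop := ∀ (mirrors : List String), Dom_find_mirror_row mirrors → Pre_find_mirror_row mirrors → Spec_find_mirror_row mirrors (find_mirror_row mirrors)

-- ===== LEMMAS AND PROOFS =====

-- row i of the pattern (in range wherever it is used)
def rowN (mirrors : List String) (i : Nat) : String := mirrors.getD i ""

-- the list of indices A's dict stores for a given line
def idxL (mirrors : List String) (line : String) : List Int :=
  ((List.range mirrors.length).filter (fun i => rowN mirrors i == line)).map (fun i : Nat => (i:Int))

-- A's top-pass inner check, on the Nat side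
def Qtop (mirrors : List String) (i : Nat) : Bool :=
  (List.range ((i+1)/2)).all (fun j => rowN mirrors (i - j) == rowN mirrors j)

-- A's bottom-pass inner check, on the Nat side
def Qbot (mirrors : List String) (p : Nat) : Bool :=
  (List.range ((mirrors.length - p)/2)).all
    (fun j => rowN mirrors (p + j) == rowN mirrors (mirrors.length - 1 - j))

theorem enum_eq (xs : List String) (k : Int) :
    PySem.List.enumerate xs k = (List.range xs.length).map (fun i : Nat => ((k + i : Int), xs.getD i "")) := by
  induction xs generalizing k with
  | nil => simp [PySem.List.enumerate]
  | cons x t ih =>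
    rw [show PySem.List.enumerate (x :: t) k = (k, x) :: PySem.List.enumerate t (k+1) from rfl, ih]
    simp only [List.length_cons, List.range_succ_eq_map, List.map_cons, List.map_map]
    congr 1
    · norm_num
    · apply List.map_congr_left; intro i _
      simp only [Function.comp_def, List.getD_cons_succ]
      congr 1
      push_cast; ring

theorem dict_getD (mirrors : List String) (line : String) :
    ((PySem.List.enumerate mirrors).foldl (fun d p => d.modify p.2 [] (fun x => x ++ [p.1])) PySem.Dict.empty).getD line []
      = idxL mirrors line := by
  have hfm := List.foldl_map (f := fun (p : Int × String) => (p.2, p.1))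
      (g := fun (d : PySem.Dict String (List Int)) q => d.modify q.1 [] (fun x => x ++ [q.2]))
      (l := PySem.List.enumerate mirrors) (init := PySem.Dict.empty)
  rw [show ((PySem.List.enumerate mirrors).foldl (fun d p => d.modify p.2 [] (fun x => x ++ [p.1])) PySem.Dict.empty)
      = (((PySem.List.enumerate mirrors).map (fun p => (p.2, p.1))).foldl (fun d q => d.modify q.1 [] (fun x => x ++ [q.2])) PySem.Dict.empty)
    from hfm.symm]
  rw [PySem.Dict.getD_foldl_modify_append]
  rw [enum_eq mirrors 0]
  rw [List.map_map, List.filter_map, List.map_map]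
  unfold idxL
  simp only [PySem.Dict.getD_empty, List.nil_append, Function.comp_def, rowN]
  norm_num

theorem contains_idx (mirrors : List String) (line : String) (t : Nat) (ht : t < mirrors.length) :
    ((idxL mirrors line).contains ((t:Int))) = (rowN mirrors t == line) := by
  unfold idxL
  rw [Bool.eq_iff_iff]
  simp only [List.contains_iff_exists_mem_beq, List.mem_map, List.mem_filter, List.mem_range, beq_iff_eq]
  constructor
  · rintro ⟨q, ⟨i, ⟨hi, hrow⟩, rfl⟩, hq⟩
    have : i = t := by exact_mod_cast hq.symm
    subst this; exact hrow
  · intro h; exact ⟨t, ⟨t, ⟨ht, h⟩, rfl⟩, rfl⟩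

theorem top_reindex (Q : Nat → Bool) (n : Nat) :
    (List.range n).filter (fun i => ((i+1) % 2 == 0) && Q i)
      = ((List.range (n/2)).map (fun k => 2*k+1)).filter Q := by
  induction n with
  | zero => simp
  | succ n ih =>
    rw [List.range_succ, List.filter_append, ih]
    rcases Nat.mod_two_eq_zero_or_one n with h | h
    · have h2 : (n+1) % 2 = 1 := by omega
      have hd : (n+1)/2 = n/2 := by omega
      simp [h2, hd]
    · have h2 : (n+1) % 2 = 0 := by omega
      have hd : (n+1)/2 = n/2 + 1 := by omega
      have hn : 2*(n/2)+1 = n := by omega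
      rw [hd, List.range_succ, List.map_append, List.filter_append]
      simp [List.filter_cons, h2, hn]

theorem bot_reindex (Q : Nat → Bool) (r : Nat) (hr : r < 2) (m : Nat) :
    (List.range (2*m + r)).filter (fun p => ((2*m + r - p) % 2 == 0) && Q p)
      = ((List.range m).map (fun k => r + 2*k)).filter Q := by
  induction m with
  | zero => interval_cases r <;> simp
  | succ m ih =>
    rw [show 2*(m+1)+r = (2*m+r+1)+1 by ring]
    rw [List.range_succ, List.filter_append, List.range_succ, List.filter_append]
    have hc : (List.range (2*m+r)).filter (fun p => ((2*m+r+1+1 - p) % 2 == 0) && Q p)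
        = (List.range (2*m+r)).filter (fun p => ((2*m + r - p) % 2 == 0) && Q p) := by
      apply List.filter_congr; intro p hp
      simp only [List.mem_range] at hp
      have : (2*m+r+1+1 - p) % 2 = (2*m+r-p) % 2 := by omega
      rw [this]
    rw [hc, ih, List.range_succ, List.map_append, List.filter_append]
    have e1 : (2*m+r+1+1 - (2*m+r)) % 2 = 0 := by omega
    have e2 : (2*m+r+1+1 - (2*m+r+1)) % 2 = 1 := by omega
    simp [List.filter_cons, e1, show r + 2*m = 2*m+r by ring]

theorem range'_one_reverse (m : Nat) :
    (List.range' 1 m).reverse = (List.range m).map (fun k => m - k) := by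
  induction m with
  | zero => simp
  | succ m ih =>
    rw [List.range'_concat, List.reverse_append, List.range_succ_eq_map, List.map_cons, List.map_map]
    simp only [List.reverse_cons, List.reverse_nil, List.nil_append, List.singleton_append]
    rw [ih]
    congr 1
    · omega
    · apply List.map_congr_left; intro k _
      simp


theorem top_cond (mirrors : List String) (i : Nat) (hi : i < mirrors.length) :
    ((!((i:Int) == 0) && !(PySem.Int.mod ((i:Int)+1) 2 != 0) &&
      (PySem.List.pyRange 0 (PySem.Int.floordiv ((i:Int)+1) 2) 1).all (fun j =>
        (idxL mirrors (PySem.List.pyGetD mirrors j "")).contains ((i:Int) - j)))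
      && (rowN mirrors i == mirrors.getD 0 ""))
    = (((i+1) % 2 == 0) && Qtop mirrors i) := by
  have hmod : PySem.Int.mod ((i:Int)+1) 2 = (((i+1) % 2 : Nat) : Int) := by
    rw [show ((i:Int)+1) = (((i+1:Nat)):Int) by push_cast; ring,
        show (2:Int) = ((2:Nat):Int) by norm_num, PySem.Int.mod_natCast]
  have hdiv : PySem.Int.floordiv ((i:Int)+1) 2 = (((i+1)/2 : Nat) : Int) := by
    rw [show ((i:Int)+1) = (((i+1:Nat)):Int) by push_cast; ring,
        show (2:Int) = ((2:Nat):Int) by norm_num, PySem.Int.floordiv_natCast]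
  rw [hmod, hdiv]
  by_cases hpar : (i+1) % 2 = 0
  · have hi0 : i ≠ 0 := by omega
    have hsle : (i+1)/2 ≤ i := by omega
    have e1 : ((i:Int) == 0) = false := by
      simp only [beq_eq_false_iff_ne, ne_eq]
      exact_mod_cast hi0
    have e2 : (((((i+1)%2:Nat)):Int) != 0) = false := by
      simp only [bne_eq_false_iff_eq]
      exact_mod_cast hpar
    rw [PySem.List.pyRange_zero_nat ((i+1)/2), List.all_map]
    have hall : ((List.range ((i+1)/2)).all ((fun j : Int =>
        (idxL mirrors (PySem.List.pyGetD mirrors j "")).contains ((i:Int) - j)) ∘ (fun k : Nat => (k:Int))))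
        = Qtop mirrors i := by
      unfold Qtop
      rw [Bool.eq_iff_iff]
      simp only [List.all_eq_true, List.mem_range, Function.comp_apply]
      apply forall_congr'; intro j
      apply imp_congr_right; intro hj
      rw [PySem.List.pyGetD_natCast, show ((i:Int) - (j:Int)) = (((i-j:Nat)):Int) by omega,
          contains_idx mirrors _ (i-j) (by omega)]
      rfl
    rw [hall]
    have hpt : (((i+1) % 2) == 0) = true := by simp [hpar]
    cases hq : Qtop mirrors i
    · rw [e1, e2, hpt]; simp
    · have hj0 : (rowN mirrors i == rowN mirrors 0) = true := by
        have h0 := (List.all_eq_true.mp hq) 0 (by simp [List.mem_range]; omega)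
        simpa using h0
      have hrow : (rowN mirrors i == mirrors.getD 0 "") = true := hj0
      rw [e1, e2, hpt, hrow]
      simp
  · have e2 : (((((i+1)%2:Nat)):Int) != 0) = true := by
      simp only [bne_iff_ne, ne_eq]
      exact_mod_cast hpar
    have hpf : (((i+1) % 2) == 0) = false := by simp [hpar]
    rw [e2, hpf]
    simp

theorem top_shift (mirrors : List String) (k : Nat) :
    Qtop mirrors (2*k+1) = (List.range (1+k)).all (fun j => mirrors.getD j "" == mirrors.getD (2*(1+k)-1-j) "") := by
  unfold Qtop
  rw [Bool.eq_iff_iff]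
  simp only [List.all_eq_true, List.mem_range]
  rw [show (2*k+1+1)/2 = 1+k by omega]
  apply forall_congr'; intro j
  apply imp_congr_right; intro hj
  rw [show 2*(1+k)-1-j = 2*k+1-j by omega]
  simp only [rowN, beq_iff_eq]
  exact eq_comm

theorem top_half (mirrors : List String) :
    (idxL mirrors (mirrors.getD 0 "")).foldl
      (fun acc p =>
        if p == 0 then acc
        else if PySem.Int.mod (p + 1) 2 != 0 then acc
        else if (PySem.List.pyRange 0 (PySem.Int.floordiv (p + 1) 2) 1).all (fun i =>
            (idxL mirrors (PySem.List.pyGetD mirrors i "")).contains (p - i))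
        then acc ++ [PySem.Int.floordiv (p + 1) 2] else acc) []
    = ((List.range' 1 (mirrors.length / 2)).filter (fun s =>
        (List.range s).all (fun j => mirrors.getD j "" == mirrors.getD (2*s-1-j) ""))).map
        (fun s : Nat => (s : Int)) := by
  have hb : (fun (acc : List Int) (p : Int) =>
        if p == 0 then acc
        else if PySem.Int.mod (p + 1) 2 != 0 then acc
        else if (PySem.List.pyRange 0 (PySem.Int.floordiv (p + 1) 2) 1).all (fun i =>
            (idxL mirrors (PySem.List.pyGetD mirrors i "")).contains (p - i))
        then acc ++ [PySem.Int.floordiv (p + 1) 2] else acc)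
      = (fun acc p =>
        if (!(p == 0) && !(PySem.Int.mod (p + 1) 2 != 0) &&
            (PySem.List.pyRange 0 (PySem.Int.floordiv (p + 1) 2) 1).all (fun i =>
            (idxL mirrors (PySem.List.pyGetD mirrors i "")).contains (p - i)))
        then acc ++ [PySem.Int.floordiv (p + 1) 2] else acc) := by
    funext acc p
    cases h1 : (p == 0) <;>
      cases h2 : (PySem.Int.mod (p + 1) 2 != 0) <;>
      cases h3 : (PySem.List.pyRange 0 (PySem.Int.floordiv (p + 1) 2) 1).all (fun i =>
            (idxL mirrors (PySem.List.pyGetD mirrors i "")).contains (p - i)) <;>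
      simp [h1, h2, h3]
  rw [hb, PySem.List.foldl_append_if, List.nil_append]
  conv_lhs => rw [idxL, List.filter_map, List.map_map, List.filter_filter]
  simp only [Function.comp_def]
  have hcongr := List.filter_congr (l := List.range mirrors.length)
    (p := fun i : Nat =>
      (!((i:Int) == 0) && !(PySem.Int.mod ((i:Int) + 1) 2 != 0) &&
        (PySem.List.pyRange 0 (PySem.Int.floordiv ((i:Int) + 1) 2) 1).all (fun j =>
          (idxL mirrors (PySem.List.pyGetD mirrors j "")).contains ((i:Int) - j))) &&
        (rowN mirrors i == mirrors.getD 0 ""))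
    (q := fun i : Nat => ((i+1) % 2 == 0) && Qtop mirrors i)
    (fun i hmem => by
      rw [List.mem_range] at hmem
      exact top_cond mirrors i hmem)
  rw [hcongr]
  rw [top_reindex (Qtop mirrors) mirrors.length, List.filter_map, List.map_map]
  conv_rhs => rw [List.range'_eq_map_range, List.filter_map, List.map_map]
  simp only [Function.comp_def, top_shift]
  apply List.map_congr_left; intro k hmem
  rw [show ((2*k+1 : Nat):Int) + 1 = ((2*k+2 : Nat):Int) by push_cast; ring,
      show (2:Int) = ((2:Nat):Int) by norm_num, PySem.Int.floordiv_natCast]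
  congr 1
  omega

theorem bot_cond (mirrors : List String) (i : Nat) (hi : i < mirrors.length) :
    ((!((i:Int) == (mirrors.length:Int) - 1) && !(PySem.Int.mod ((mirrors.length:Int) - i) 2 != 0) &&
      (PySem.List.pyRange 0 (PySem.Int.floordiv ((mirrors.length:Int) - i) 2) 1).all (fun j =>
        (idxL mirrors (PySem.List.pyGetD mirrors ((mirrors.length:Int) - 1 - j) "")).contains ((i:Int) + j)))
      && (rowN mirrors i == rowN mirrors (mirrors.length - 1)))
    = ((((mirrors.length - i) % 2 == 0)) && Qbot mirrors i) := by
  set n := mirrors.length with hn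
  have hcast : ((n:Int) - i) = (((n - i : Nat)):Int) := by omega
  have hmod : PySem.Int.mod ((n:Int) - i) 2 = (((n - i) % 2 : Nat) : Int) := by
    rw [hcast, show (2:Int) = ((2:Nat):Int) by norm_num, PySem.Int.mod_natCast]
  have hdiv : PySem.Int.floordiv ((n:Int) - i) 2 = (((n - i)/2 : Nat) : Int) := by
    rw [hcast, show (2:Int) = ((2:Nat):Int) by norm_num, PySem.Int.floordiv_natCast]
  rw [hmod, hdiv]
  by_cases hpar : (n - i) % 2 = 0
  · have hne2 : 2 ≤ n - i := by omega
    have e1 : ((i:Int) == (n:Int) - 1) = false := by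
      simp only [beq_eq_false_iff_ne, ne_eq]
      omega
    have e2 : ((((((n-i))%2:Nat)):Int) != 0) = false := by
      simp only [bne_eq_false_iff_eq]
      exact_mod_cast hpar
    rw [PySem.List.pyRange_zero_nat ((n-i)/2), List.all_map]
    have hall : ((List.range ((n-i)/2)).all ((fun j : Int =>
        (idxL mirrors (PySem.List.pyGetD mirrors ((n:Int) - 1 - j) "")).contains ((i:Int) + j)) ∘ (fun k : Nat => (k:Int))))
        = Qbot mirrors i := by
      unfold Qbot
      rw [Bool.eq_iff_iff, ← hn]
      simp only [List.all_eq_true, List.mem_range, Function.comp_apply]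
      apply forall_congr'; intro j
      apply imp_congr_right; intro hj
      rw [show ((n:Int) - 1 - (j:Int)) = (((n-1-j:Nat)):Int) by omega,
          PySem.List.pyGetD_natCast,
          show ((i:Int) + (j:Int)) = (((i+j:Nat)):Int) by omega,
          contains_idx mirrors _ (i+j) (by omega)]
      rfl
    rw [hall]
    have hpt : ((((n - i)) % 2) == 0) = true := by simp [hpar]
    cases hq : Qbot mirrors i
    · rw [e1, e2, hpt]; simp
    · have hj0 : (rowN mirrors i == rowN mirrors (n - 1)) = true := by
        have h0 := (List.all_eq_true.mp hq) 0 (by simp [List.mem_range]; omega)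
        simpa using h0
      rw [e1, e2, hpt, hj0]
      simp
  · have e2 : ((((((n-i))%2:Nat)):Int) != 0) = true := by
      simp only [bne_iff_ne, ne_eq]
      exact_mod_cast hpar
    have hpf : ((((n - i)) % 2) == 0) = false := by simp [hpar]
    rw [e2, hpf]
    simp

theorem bot_half (mirrors : List String) (init : List Int) :
    (idxL mirrors (rowN mirrors (mirrors.length - 1))).foldl
      (fun acc p =>
        if p == (mirrors.length:Int) - 1 then acc
        else if PySem.Int.mod ((mirrors.length:Int) - p) 2 != 0 then acc
        else if (PySem.List.pyRange 0 (PySem.Int.floordiv ((mirrors.length:Int) - p) 2) 1).all (fun i =>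
            (idxL mirrors (PySem.List.pyGetD mirrors ((mirrors.length:Int) - 1 - i) "")).contains (p + i))
        then acc ++ [(mirrors.length:Int) - PySem.Int.floordiv ((mirrors.length:Int) - p) 2] else acc) init
    = init ++ ((List.range' 1 (mirrors.length / 2)).reverse.filter (fun s =>
        (List.range s).all (fun j => mirrors.getD (mirrors.length - 2*s + j) "" == mirrors.getD (mirrors.length - 1 - j) ""))).map
        (fun s : Nat => (mirrors.length : Int) - (s : Int)) := by
  set n := mirrors.length with hn
  have hb : (fun (acc : List Int) (p : Int) =>
        if p == (n:Int) - 1 then acc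
        else if PySem.Int.mod ((n:Int) - p) 2 != 0 then acc
        else if (PySem.List.pyRange 0 (PySem.Int.floordiv ((n:Int) - p) 2) 1).all (fun i =>
            (idxL mirrors (PySem.List.pyGetD mirrors ((n:Int) - 1 - i) "")).contains (p + i))
        then acc ++ [(n:Int) - PySem.Int.floordiv ((n:Int) - p) 2] else acc)
      = (fun acc p =>
        if (!(p == (n:Int) - 1) && !(PySem.Int.mod ((n:Int) - p) 2 != 0) &&
            (PySem.List.pyRange 0 (PySem.Int.floordiv ((n:Int) - p) 2) 1).all (fun i =>
            (idxL mirrors (PySem.List.pyGetD mirrors ((n:Int) - 1 - i) "")).contains (p + i)))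
        then acc ++ [(n:Int) - PySem.Int.floordiv ((n:Int) - p) 2] else acc) := by
    funext acc p
    cases h1 : (p == (n:Int) - 1) <;>
      cases h2 : (PySem.Int.mod ((n:Int) - p) 2 != 0) <;>
      cases h3 : (PySem.List.pyRange 0 (PySem.Int.floordiv ((n:Int) - p) 2) 1).all (fun i =>
            (idxL mirrors (PySem.List.pyGetD mirrors ((n:Int) - 1 - i) "")).contains (p + i)) <;>
      simp [h1, h2, h3]
  rw [hb, PySem.List.foldl_append_if]
  congr 1
  conv_lhs => rw [idxL, List.filter_map, List.map_map, List.filter_filter]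
  simp only [Function.comp_def]
  have hcongr := List.filter_congr (l := List.range mirrors.length)
    (p := fun i : Nat =>
      (!((i:Int) == (n:Int) - 1) && !(PySem.Int.mod ((n:Int) - i) 2 != 0) &&
        (PySem.List.pyRange 0 (PySem.Int.floordiv ((n:Int) - i) 2) 1).all (fun j =>
          (idxL mirrors (PySem.List.pyGetD mirrors ((n:Int) - 1 - j) "")).contains ((i:Int) + j))) &&
        (rowN mirrors i == rowN mirrors (n - 1)))
    (q := fun i : Nat => (((n - i) % 2 == 0)) && Qbot mirrors i)
    (fun i hmem => by
      rw [List.mem_range] at hmem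
      exact bot_cond mirrors i hmem)
  rw [hn] at hcongr
  rw [hcongr]
  have hbr := bot_reindex (Qbot mirrors) (n % 2) (by omega) (n / 2)
  rw [show 2*(n/2) + n % 2 = n by omega] at hbr
  rw [hn] at hbr
  rw [hbr]
  rw [List.filter_map, List.map_map]
  conv_rhs => rw [range'_one_reverse, List.filter_map, List.map_map]
  simp only [Function.comp_def]
  have hcongr2 := List.filter_congr (l := List.range (n/2))
    (p := fun k : Nat => Qbot mirrors (n % 2 + 2*k))
    (q := fun k : Nat => (List.range (n/2 - k)).all (fun j =>
        mirrors.getD (n - 2*(n/2 - k) + j) "" == mirrors.getD (n - 1 - j) ""))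
    (fun k hmem => by
      rw [List.mem_range] at hmem
      unfold Qbot
      rw [Bool.eq_iff_iff, ← hn]
      simp only [List.all_eq_true, List.mem_range]
      rw [show (n - (n % 2 + 2*k))/2 = n/2 - k by omega]
      apply forall_congr'; intro j
      apply imp_congr_right; intro hj
      rw [show n - 2*(n/2 - k) + j = n % 2 + 2*k + j by omega]
      rfl)
  rw [hn] at hcongr2
  rw [hcongr2]
  apply List.map_congr_left; intro k hmem
  have hk : k < n/2 := by
    have := List.mem_of_mem_filter hmem
    rw [hn]
    exact List.mem_range.mp this
  rw [show ((n:Int) - ((n % 2 + 2*k : Nat):Int)) = (((n - (n % 2 + 2*k) : Nat)):Int) by omega,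
      show (2:Int) = ((2:Nat):Int) by norm_num, PySem.Int.floordiv_natCast]
  congr 2
  omega


theorem last_eq_rowN (mirrors : List String) (hne : mirrors ≠ []) :
    mirrors.getLast hne = rowN mirrors (mirrors.length - 1) := by
  rw [List.getLast_eq_getElem, rowN, List.getD_eq_getElem mirrors "" (by
    have : 0 < mirrors.length := List.length_pos_iff.mpr hne
    omega)]

-- ===== VERDICT (by name: the statement is the Claim_ definition above) =====
theorem find_mirror_row_spec : Claim_equal_find_mirror_row := by
  unfold Claim_equal_find_mirror_row
  intro mirrors _ hne
  unfold Pre_find_mirror_row at hne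
  unfold Spec_find_mirror_row find_mirror_row find_mirror_row_alt
  simp only [PySem.List.len_eq, dict_getD, PySem.List.pyGetD_zero,
    PySem.List.pyGetD_neg_one mirrors "" hne, last_eq_rowN mirrors hne]
  rw [top_half mirrors, bot_half mirrors]
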